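-- pv_equiv track=rewrite | github.com/LifeArchiveProject/WeChatDataAnalysis | src/wechat_decrypt_tool/media_helpers.py | _normalize_variant_basename
-- ===== SOURCE A (Python) =====
-- def _normalize_variant_basename(name: str) -> str:
--     """Normalize a media filename stem by stripping common variant suffixes.
--
--     Mirrors echotrace's idea of normalizing `.t/.h/.b/.c` and `_t/_h/_b/_c`.
--     """
--     v = str(name or "").strip()
--     if not v:
--         return ""
--     lower = v.lower()
--     for suf in ("_b", "_h", "_c", "_t", ".b", ".h", ".c", ".t"):
--         if lower.endswith(suf) and len(lower) > len(suf):
--             return lower[: -len(suf)]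
--     return lower
-- ===== SOURCE B (Python) =====
-- def _normalize_variant_basename(name: str) -> str:
--     """Normalize a media filename stem by stripping common variant suffixes.
--
--     The 8 variant suffixes are exactly {'_','.'} x {'b','h','c','t'}, so
--     instead of scanning a suffix list, test the last two characters directly.
--     """
--     lower = str(name or "").strip().lower()
--     if len(lower) > 2 and lower[-2] in "_." and lower[-1] in "bhct":
--         return lower[:-2]
--     return lower
-- ===== Notes on version B (the rewrite author's own statement) =====
-- stated objective: simpler
-- what changed: Replaces the loop over 8 literal suffixes with endswith by two O(1) positional character-class tests on the last two characters, exploiting that the suffix set is exactly {'_','.'} x {'b','h','c','t'}.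
import Mathlib
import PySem

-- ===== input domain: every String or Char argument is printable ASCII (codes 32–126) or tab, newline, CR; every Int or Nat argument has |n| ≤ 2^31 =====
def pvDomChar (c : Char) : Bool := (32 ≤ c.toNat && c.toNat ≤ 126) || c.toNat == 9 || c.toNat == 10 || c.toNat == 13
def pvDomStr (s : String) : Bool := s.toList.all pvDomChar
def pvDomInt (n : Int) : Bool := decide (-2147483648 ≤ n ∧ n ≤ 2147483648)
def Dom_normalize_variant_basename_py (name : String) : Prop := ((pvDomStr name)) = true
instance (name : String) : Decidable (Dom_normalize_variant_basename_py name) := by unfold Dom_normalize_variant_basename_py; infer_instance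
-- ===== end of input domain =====

-- B replaces A's scan over the 8 literal suffixes with two positional character-class
-- tests on the last two characters (the suffix set is exactly {'_','.'} × {'b','h','c','t'}); objective: simpler.

-- ===== PORT A =====
-- the for-loop over the literal suffix tuple, as structural recursion over that list
def pvLoopA (lower : String) : List String → String
  | [] => lower
  | suf :: rest =>
      if PySem.Str.endswith lower suf = true ∧ PySem.Str.len suf < PySem.Str.len lower then
        PySem.Str.slice lower none (some (-(PySem.Str.len suf)))
      else pvLoopA lower rest

def normalize_variant_basename_py (name : String) : String :=
  let v := PySem.Str.strip name     -- str(name or "").strip(): 'name or ""' is name itself (or "" when name = ""), str() is identity on str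
  if PySem.Str.len v = 0 then ""
  else pvLoopA (PySem.Str.lower v) ["_b", "_h", "_c", "_t", ".b", ".h", ".c", ".t"]

-- ===== PORT B =====
def normalize_variant_basename_py_alt (name : String) : String :=
  let lower := PySem.Str.lower (PySem.Str.strip name)
  -- Python short-circuits: lower[-2] / lower[-1] are only evaluated under len(lower) > 2,
  -- so the indices are always in range and the pyGetD default ' ' is never the looked-up value
  if 2 < PySem.Str.len lower
     ∧ PySem.List.pyGetD lower.toList (-2) ' ' ∈ "_.".toList
     ∧ PySem.List.pyGetD lower.toList (-1) ' ' ∈ "bhct".toList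
  then PySem.Str.slice lower none (some (-2))
  else lower

-- ===== PRECONDITION & SPEC =====
def Spec_normalize_variant_basename_py (name : String) (out : String) : Prop := out = normalize_variant_basename_py_alt name
instance (name : String) (out : String) : Decidable (Spec_normalize_variant_basename_py name out) := by unfold Spec_normalize_variant_basename_py; infer_instance

-- ===== CLAIM (what is proved, stated in full; the proofs are below) =====
def Claim_equal_normalize_variant_basename_py : Prop := ∀ (name : String), Dom_normalize_variant_basename_py name → Spec_normalize_variant_basename_py name (normalize_variant_basename_py name)

-- ===== LEMMAS AND PROOFS =====

-- a 2-element suffix of a list ending in [y, x] pins down those two characters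
theorem suffix_two {p : List Char} {y x a b : Char} :
    [a, b] <:+ p ++ [y, x] ↔ y = a ∧ x = b := by
  constructor
  · rintro ⟨t, ht⟩
    have := List.append_inj' ht (by simp)
    simp at this
    exact ⟨this.2.1.symm, this.2.2.symm⟩
  · rintro ⟨rfl, rfl⟩; exact ⟨p, rfl⟩

-- collapse A's if-chain: every taken branch returns the same value
theorem ite_chain {α : Type} (c d : Prop) [Decidable c] [Decidable d] (t e : α) :
    (if c then t else if d then t else e) = if c ∨ d then t else e := by
  split_ifs <;> tauto

theorem str_eq_empty (s : String) (h : s.toList = []) : s = "" := by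
  cases s; simp_all

-- the suffix loop of A agrees with B's last-two-characters test, for every string
theorem loopA_eq_charclass (lower : String) :
    pvLoopA lower ["_b", "_h", "_c", "_t", ".b", ".h", ".c", ".t"] =
      (if 2 < PySem.Str.len lower
          ∧ PySem.List.pyGetD lower.toList (-2) ' ' ∈ "_.".toList
          ∧ PySem.List.pyGetD lower.toList (-1) ' ' ∈ "bhct".toList
       then PySem.Str.slice lower none (some (-2))
       else lower) := by
  have e1 : ("_b" : String).toList = ['_', 'b'] := by decide
  have e2 : ("_h" : String).toList = ['_', 'h'] := by decide
  have e3 : ("_c" : String).toList = ['_', 'c'] := by decide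
  have e4 : ("_t" : String).toList = ['_', 't'] := by decide
  have e5 : (".b" : String).toList = ['.', 'b'] := by decide
  have e6 : (".h" : String).toList = ['.', 'h'] := by decide
  have e7 : (".c" : String).toList = ['.', 'c'] := by decide
  have e8 : (".t" : String).toList = ['.', 't'] := by decide
  have m1 : ("_." : String).toList = ['_', '.'] := by decide
  have m2 : ("bhct" : String).toList = ['b', 'h', 'c', 't'] := by decide
  simp only [pvLoopA, PySem.Str.endswith_eq, PySem.Chars.endswith_iff, PySem.Str.len_eq,
    e1, e2, e3, e4, e5, e6, e7, e8, m1, m2]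
  rcases hr : lower.toList.reverse with _ | ⟨x, _ | ⟨y, rest⟩⟩
  · have hl : lower.toList = [] := by
      have := congrArg List.reverse hr; simpa using this
    simp [hl]
  · have hl : lower.toList = [x] := by
      have := congrArg List.reverse hr; simpa using this
    simp [hl]
  · have hl : lower.toList = rest.reverse ++ [y, x] := by
      have := congrArg List.reverse hr; simpa using this
    rw [hl]
    rw [PySem.List.pyGetD_neg_ofNat _ 2 ' ' (by norm_num) (by simp),
        PySem.List.pyGetD_neg_ofNat _ 1 ' ' (by norm_num) (by simp)]
    simp only [suffix_two, List.length_append, List.length_reverse, List.length_cons,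
      List.length_nil, ite_chain]
    rw [List.getElem_append_right (by simp), List.getElem_append_right (by simp)]
    norm_num
    exact if_congr (by tauto) rfl rfl

-- ===== VERDICT (by name: the statement is the Claim_ definition above) =====
theorem normalize_variant_basename_py_spec : Claim_equal_normalize_variant_basename_py := by
  intro name _
  unfold Spec_normalize_variant_basename_py normalize_variant_basename_py
    normalize_variant_basename_py_alt
  by_cases h : PySem.Str.len (PySem.Str.strip name) = 0
  · have hl : (PySem.Str.strip name).toList = [] := by
      have := PySem.Str.len_eq (PySem.Str.strip name)
      rw [h] at this
      exact List.eq_nil_of_length_eq_zero (by exact_mod_cast this.symm)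
    rw [str_eq_empty _ hl]
    decide
  · simp only [if_neg h]
    exact loopA_eq_charclass _
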